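-- pv_equiv track=rewrite | github.com/yanzhenxing123/algorithms | array_delete_operations_fixed.py | min_delete_operations
-- ===== SOURCE A (Python) =====
-- def min_delete_operations(n, arr):
--     """
--     计算最少删除操作次数
--     重新理解：我们需要找到一种删除策略，让剩余数组单调递增
--     """
--     if n == 0:
--         return 0
--
--     # 如果数组已经单调递增，不需要删除
--     if is_monotonic_increasing(arr):
--         return 0
--
--     # 关键洞察：我们需要尝试删除不同的元素组合
--     # 找到所有不同的元素值
--     unique_values = sorted(set(arr))
--
--     # 尝试删除不同的元素组合，找到能让剩余数组单调递增的最少删除次数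
--     min_deletions = len(unique_values)  # 最坏情况：删除所有元素
--
--     # 尝试删除0到len(unique_values)-1种元素
--     for delete_count in range(len(unique_values)):
--         # 生成所有可能的删除组合
--         from itertools import combinations
--
--         for delete_values in combinations(unique_values, delete_count):
--             # 删除指定的元素值
--             remaining = [x for x in arr if x not in delete_values]
--
--             # 检查剩余数组是否单调递增
--             if is_monotonic_increasing(remaining):
--                 min_deletions = min(min_deletions, delete_count)
--                 break
--
--         # 如果找到解，提前退出
--         if min_deletions <= delete_count:
--             break
--
--     return min_deletions
--
-- def is_monotonic_increasing(arr):
--     """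
--     检查数组是否已经是单调递增的
--     """
--     for i in range(1, len(arr)):
--         if arr[i] < arr[i-1]:
--             return False
--     return True
-- ===== SOURCE B (Python) =====
-- def min_delete_operations(n, arr):
--     # Interval-chain DP: answer = #distinct values - longest chain of values
--     # (ascending) whose occurrence intervals are disjoint and in order.
--     if n == 0:
--         return 0
--     m = len(arr)
--     rev = arr[::-1]
--     vals = sorted(set(arr))
--     iv = [(arr.index(v), m - 1 - rev.index(v)) for v in vals]  # (first, last) per value
--     dp = []  # dp[j] = longest keepable chain ending at vals[j]
--     for (fi, li) in iv:
--         best = 0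
--         for (fj, lj), d in zip(iv, dp):
--             if lj < fi and d > best:
--                 best = d
--         dp.append(best + 1)
--     return len(vals) - max(dp, default=0)
-- ===== Notes on version B (the rewrite author's own statement) =====
-- stated objective: faster
-- what changed: Replaces the exponential search over all combinations of distinct values to delete with a polynomial longest-chain DP over the first/last occurrence interval of each distinct value (answer = #distinct values - longest keepable chain).
import Mathlib
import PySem

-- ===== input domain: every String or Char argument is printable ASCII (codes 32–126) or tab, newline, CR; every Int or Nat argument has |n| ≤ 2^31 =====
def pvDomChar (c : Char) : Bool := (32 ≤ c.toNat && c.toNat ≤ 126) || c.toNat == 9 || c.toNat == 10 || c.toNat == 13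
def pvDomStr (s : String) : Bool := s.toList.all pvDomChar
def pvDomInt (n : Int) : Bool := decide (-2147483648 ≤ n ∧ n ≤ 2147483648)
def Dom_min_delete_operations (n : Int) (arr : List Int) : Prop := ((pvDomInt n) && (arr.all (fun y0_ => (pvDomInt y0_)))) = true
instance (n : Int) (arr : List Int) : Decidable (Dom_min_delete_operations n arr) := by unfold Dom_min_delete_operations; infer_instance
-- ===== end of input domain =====

-- B replaces A's exponential search over all combinations of deletable values by a
-- polynomial longest-chain DP over each distinct value's first/last occurrence interval.

-- ===== PORT A =====
-- is_monotonic_increasing: 'for i in range(1, len(arr)): if arr[i] < arr[i-1]: return False / return True'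
def is_monotonic_increasing (arr : List Int) : Bool :=
  (PySem.List.pyRange 1 (arr.length : Int)).foldl
    (fun ok i => if PySem.List.pyGetD arr i 0 < PySem.List.pyGetD arr (i - 1) 0 then false else ok)
    true

-- the 'for delete_count in range(len(unique_values))' loop with its two breaks:
-- the inner 'for delete_values in combinations(...): if mono: min_deletions = min(...); break'
-- updates min_deletions iff some combination works (.any); then 'if min_deletions <= delete_count: break'
def min_delete_loop (arr unique_values : List Int) : List Nat → Int → Int
  | [], min_deletions => min_deletions
  | delete_count :: rest, min_deletions =>
    let md := if (PySem.List.combinations unique_values delete_count).any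
        (fun delete_values => is_monotonic_increasing
          (arr.filter (fun x => !(delete_values.contains x)))) then
        min min_deletions (delete_count : Int)
      else min_deletions
    if md ≤ (delete_count : Int) then md else min_delete_loop arr unique_values rest md

def min_delete_operations (n : Int) (arr : List Int) : Int :=
  if n == 0 then 0
  else if is_monotonic_increasing arr then 0
  else
    let unique_values := PySem.List.sorted (PySem.Set.ofList arr) (fun x => x)
    min_delete_loop arr unique_values (List.range unique_values.length)
      (unique_values.length : Int)

-- ===== PORT B =====
def min_delete_operations_alt (n : Int) (arr : List Int) : Int :=
  if n == 0 then 0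
  else
    let m := arr.length
    let rev := (PySem.List.slice? arr none none (-1)).getD []  -- arr[::-1]; step -1 ≠ 0: never none
    let vals := PySem.List.sorted (PySem.Set.ofList arr) (fun x => x)
    -- every v ∈ vals occurs in arr, so list.index never raises; the .getD 0 is unreachable
    let iv := vals.map (fun v =>
      ((((PySem.List.index? arr v).getD 0 : Nat) : Int),
       (m : Int) - 1 - (((PySem.List.index? rev v).getD 0 : Nat) : Int)))
    let dp := iv.foldl (fun (dp : List Int) p =>
      dp ++ [(iv.zip dp).foldl
        (fun best q => if q.1.2 < p.1 ∧ q.2 > best then q.2 else best) 0 + 1]) []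
    (vals.length : Int) - PySem.List.maxD dp (fun x => x) 0

-- ===== PRECONDITION & SPEC =====
def Spec_min_delete_operations (n : Int) (arr : List Int) (out : Int) : Prop := out = min_delete_operations_alt n arr
instance (n : Int) (arr : List Int) (out : Int) : Decidable (Spec_min_delete_operations n arr out) := by unfold Spec_min_delete_operations; infer_instance

-- ===== CLAIM (what is proved, stated in full; the proofs are below) =====
def Claim_equal_min_delete_operations : Prop := ∀ (n : Int) (arr : List Int), Dom_min_delete_operations n arr → Spec_min_delete_operations n arr (min_delete_operations n arr)

-- ===== LEMMAS AND PROOFS =====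

-- first / last occurrence index of a value, as B computes them
def fN (arr : List Int) (v : Int) : Nat := List.idxOf v arr
def lN (arr : List Int) (v : Int) : Nat := arr.length - 1 - List.idxOf v arr.reverse
-- the (first, last) pair B stores for a value
def pvB (arr : List Int) (v : Int) : Int × Int :=
  ((((PySem.List.index? arr v).getD 0 : Nat) : Int),
   (arr.length : Int) - 1 - (((PySem.List.index? arr.reverse v).getD 0 : Nat) : Int))
-- chain relation on (first,last) pairs: previous interval ends before the next begins
def RP (q p : Int × Int) : Prop := q.2 < p.1

theorem fN_min {arr : List Int} {v : Int} {i : Nat} (hi : i < arr.length) (h : arr[i] = v) :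
    fN arr v ≤ i := by
  unfold fN
  induction arr generalizing i with
  | nil => simp at hi
  | cons a l ih =>
    rw [List.idxOf_cons]
    by_cases hav : a == v
    · simp [hav]
    · simp only [hav, cond_false]
      cases i with
      | zero => simp at h; exact absurd (by simp [h]) hav
      | succ i => simpa using ih (by simpa using hi) (by simpa using h)

theorem fN_lt_length {arr : List Int} {v : Int} (h : v ∈ arr) : fN arr v < arr.length :=
  List.idxOf_lt_length_of_mem h

theorem getElem_fN {arr : List Int} {v : Int} (h : v ∈ arr) :
    arr[fN arr v]'(fN_lt_length h) = v := List.getElem_idxOf _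

theorem idxOf?_of_mem {arr : List Int} {v : Int} (h : v ∈ arr) :
    List.idxOf? v arr = some (List.idxOf v arr) := by
  rw [List.idxOf?_eq_some_iff]
  have hlen := List.idxOf_lt_length_of_mem h
  refine ⟨hlen, List.getElem_idxOf _, fun j hj hv => ?_⟩
  have := fN_min (show j < arr.length by omega) hv
  simp only [fN] at this
  omega

theorem lN_lt_length {arr : List Int} {v : Int} (h : v ∈ arr) : lN arr v < arr.length := by
  have hr : v ∈ arr.reverse := by simpa using h
  have := List.idxOf_lt_length_of_mem hr
  unfold lN
  simp at this ⊢
  omega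

theorem getElem_lN {arr : List Int} {v : Int} (h : v ∈ arr) :
    arr[lN arr v]'(lN_lt_length h) = v := by
  have hr : v ∈ arr.reverse := by simpa using h
  have hlt := List.idxOf_lt_length_of_mem hr
  have hg : arr.reverse[List.idxOf v arr.reverse]'hlt = v := List.getElem_idxOf _
  rw [List.getElem_reverse] at hg
  unfold lN
  exact hg

theorem lN_max {arr : List Int} {v : Int} {i : Nat} (hi : i < arr.length) (h : arr[i] = v) :
    i ≤ lN arr v := by
  have hrl : arr.length - 1 - i < arr.reverse.length := by simp; omega
  have hrv : arr.reverse[arr.length - 1 - i]'hrl = v := by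
    rw [List.getElem_reverse]
    have : arr.length - 1 - (arr.length - 1 - i) = i := by simp at hrl; omega
    simp_rw [this]; exact h
  have hmin : List.idxOf v arr.reverse ≤ arr.length - 1 - i := fN_min hrl hrv
  unfold lN
  omega

theorem fN_le_lN {arr : List Int} {v : Int} (h : v ∈ arr) : fN arr v ≤ lN arr v :=
  fN_min (lN_lt_length h) (getElem_lN h)

theorem pvB_eq {arr : List Int} {v : Int} (h : v ∈ arr) :
    pvB arr v = ((fN arr v : Int), (lN arr v : Int)) := by
  have hr : v ∈ arr.reverse := by simpa using h
  have hlt := List.idxOf_lt_length_of_mem hr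
  simp only [pvB, PySem.List.index?_eq_idxOf?, idxOf?_of_mem h, idxOf?_of_mem hr, Option.getD_some]
  have hlen : arr.reverse.length = arr.length := by simp
  unfold fN lN
  simp only [Prod.mk.injEq]
  refine ⟨trivial, ?_⟩
  rw [hlen] at hlt
  omega

-- is_monotonic_increasing decides Pairwise (≤)
theorem isMono_iff (l : List Int) :
    is_monotonic_increasing l = true ↔ List.Pairwise (· ≤ ·) l := by
  unfold is_monotonic_increasing
  have h := PySem.List.foldl_if_false_eq
    (fun i => decide (PySem.List.pyGetD l i 0 < PySem.List.pyGetD l (i - 1) 0))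
    (PySem.List.pyRange 1 (l.length : Int)) true
  simp only [decide_eq_true_eq] at h
  rw [h]
  simp only [Bool.true_and, Bool.not_eq_true', List.any_eq_false, decide_eq_true_eq]
  constructor
  · intro hall
    rw [← List.isChain_iff_pairwise, List.isChain_iff_getElem]
    intro k hk
    have hmem : ((k : Int) + 1) ∈ PySem.List.pyRange 1 (l.length : Int) := by
      rw [PySem.List.mem_pyRange_one]; omega
    have := hall _ hmem
    rw [PySem.List.pyGetD_eq_getElem l 0 (by omega) (by push_cast; omega)] at this
    have h2 : (k : Int) + 1 - 1 = (k : Int) := by ring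
    rw [h2, PySem.List.pyGetD_eq_getElem l 0 (by omega) (by push_cast; omega)] at this
    simp only [Int.toNat_natCast] at this
    have h5 : l[((k : Int) + 1).toNat]'(by push_cast; omega) = l[k + 1]'hk := by
      congr 1 <;> omega
    rw [h5] at this
    omega
  · intro hp i hi
    rw [PySem.List.mem_pyRange_one] at hi
    rw [PySem.List.pyGetD_eq_getElem l 0 (by omega) (by omega),
        PySem.List.pyGetD_eq_getElem l 0 (by omega) (by omega)]
    have hc := (List.isChain_iff_pairwise (R := (· ≤ · : Int → Int → Prop))).mpr hp
    rw [List.isChain_iff_getElem] at hc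
    have := hc (i - 1).toNat (by omega)
    have h5 : l[(i - 1).toNat + 1]'(by omega) = l[i.toNat]'(by omega) := by
      congr 1 <;> omega
    rw [h5] at this
    omega

-- the filtered list is sorted iff every kept pair of values in increasing order
-- has disjoint, correctly ordered occurrence intervals
theorem mono_filter_iff (arr : List Int) (p : Int → Bool) :
    List.Pairwise (· ≤ ·) (arr.filter p) ↔
      (∀ v w, v ∈ arr → w ∈ arr → p v = true → p w = true → v < w → lN arr v < fN arr w) := by
  rw [List.pairwise_filter]
  constructor
  · intro hpw v w hv hw hpv hpw' hlt
    by_contra hge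
    push Not at hge
    rw [List.pairwise_iff_getElem] at hpw
    have hiw := fN_lt_length hw
    have hjv := lN_lt_length hv
    rcases lt_trichotomy (fN arr w) (lN arr v) with hc | hc | hc
    · have := hpw (fN arr w) (lN arr v) hiw hjv hc
      rw [getElem_fN hw, getElem_lN hv] at this
      have := this hpw' hpv
      omega
    · have : w = v := by
        have h1 := getElem_fN hw
        have h2 := getElem_lN hv
        rw [← h1, ← h2]
        congr 1 <;> omega
      omega
    · omega
  · intro hgood
    rw [List.pairwise_iff_getElem]
    intro i j hi hj hij hpi hpj
    by_contra hgt
    push Not at hgt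
    have hlt : arr[j] < arr[i] := by omega
    have := hgood arr[j] arr[i] (List.getElem_mem hj) (List.getElem_mem hi) hpj hpi hlt
    have h1 : fN arr arr[i] ≤ i := fN_min hi rfl
    have h2 : j ≤ lN arr arr[j] := lN_max hj rfl
    omega

-- ===== complement lemmas on the nodup sorted value list =====
theorem filter_mem_of_sublist {D uniq : List Int} (hnd : uniq.Nodup) (h : D.Sublist uniq) :
    uniq.filter (fun x => decide (x ∈ D)) = D := by
  induction h with
  | slnil => rfl
  | @cons l₁ l₂ a h ih =>
    rw [List.nodup_cons] at hnd
    have hna : a ∉ l₁ := fun hm => hnd.1 (h.subset hm)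
    rw [List.filter_cons]
    simp only [hna, decide_false]
    exact ih hnd.2
  | @cons₂ l₁ l₂ a h ih =>
    rw [List.nodup_cons] at hnd
    rw [List.filter_cons]
    simp only [List.mem_cons, true_or, decide_true, if_true]
    have heq : l₂.filter (fun x => decide (x = a ∨ x ∈ l₁)) = l₂.filter (fun x => decide (x ∈ l₁)) := by
      apply List.filter_congr
      intro x hx
      simp only [decide_eq_decide]
      constructor
      · rintro (rfl | hm); · exact absurd hx hnd.1
        · exact hm
      · exact Or.inr
    rw [heq, ih hnd.2]

theorem length_filter_not_mem {D uniq : List Int} (hnd : uniq.Nodup) (h : D.Sublist uniq) :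
    (uniq.filter (fun x => !decide (x ∈ D))).length = uniq.length - D.length := by
  have hsplit := List.length_eq_length_filter_add (l := uniq) (fun x => decide (x ∈ D))
  rw [filter_mem_of_sublist hnd h] at hsplit
  omega

-- chain ↔ pairwise for the interval relation on values of arr (it is transitive there)
theorem chain_iff_pairwise_RR {arr K : List Int} (hmem : ∀ x ∈ K, x ∈ arr) :
    List.IsChain (fun v w => lN arr v < fN arr w) K ↔
      List.Pairwise (fun v w => lN arr v < fN arr w) K := by
  constructor
  · intro hc
    induction K with
    | nil => exact List.Pairwise.nil
    | cons a t ih =>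
      have hmem' : ∀ x ∈ t, x ∈ arr := fun x hx => hmem x (List.mem_cons_of_mem a hx)
      have hpt : List.Pairwise (fun v w => lN arr v < fN arr w) t := ih hmem' hc.tail
      rw [List.pairwise_cons]
      refine ⟨?_, hpt⟩
      intro c hct
      rcases t with _ | ⟨b, t'⟩
      · simp at hct
      · have hab : lN arr a < fN arr b := hc.rel_head
        rcases List.mem_cons.mp hct with rfl | hct'
        · exact hab
        · have hbc : lN arr b < fN arr c := (List.pairwise_cons.mp hpt).1 c hct'
          have := fN_le_lN (hmem b (by simp))
          omega
  · intro hp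
    exact hp.isChain

-- over a strictly increasing kept list, pairwise interval order ↔ goodness of its membership
theorem pairwise_RR_iff_good {arr K : List Int} (hmem : ∀ x ∈ K, x ∈ arr)
    (hlt : K.Pairwise (· < ·)) :
    List.Pairwise (fun v w => lN arr v < fN arr w) K ↔
      (∀ v w, v ∈ arr → w ∈ arr → v ∈ K → w ∈ K → v < w → lN arr v < fN arr w) := by
  constructor
  · intro hp v w _ _ hvK hwK hvw
    rw [List.pairwise_iff_getElem] at hp hlt
    obtain ⟨i, hi, rfl⟩ := List.mem_iff_getElem.mp hvK
    obtain ⟨j, hj, rfl⟩ := List.mem_iff_getElem.mp hwK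
    rcases lt_trichotomy i j with hij | rfl | hij
    · exact hp i j hi hj hij
    · omega
    · exact absurd (hlt j i hj hi hij) (by omega)
  · intro hgood
    rw [List.pairwise_iff_getElem] at hlt ⊢
    intro i j hi hj hij
    exact hgood K[i] K[j] (hmem _ (List.getElem_mem hi)) (hmem _ (List.getElem_mem hj))
      (List.getElem_mem hi) (List.getElem_mem hj) (hlt i j hi hj hij)

-- ===== DP correctness =====
theorem sublist_concat_decomp {α : Type} {C : List α} {y : α} {P : List α}
    (h : (C ++ [y]).Sublist P) :
    ∃ j, ∃ hj : j < P.length, P[j] = y ∧ C.Sublist (P.take j) := by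
  induction P generalizing C with
  | nil => simp at h
  | cons p P' ih =>
    cases C with
    | nil =>
      simp only [List.nil_append] at h
      cases h with
      | cons _ h' =>
        obtain ⟨j, hj, hy, _⟩ := ih (C := []) (by simpa using h')
        exact ⟨j + 1, by simpa using hj, by simpa using hy, by simp⟩
      | cons₂ _ h' =>
        exact ⟨0, by simp, rfl, by simp⟩
    | cons c C' =>
      rw [List.cons_append] at h
      cases h with
      | cons _ h' =>
        obtain ⟨j, hj, hy, hc⟩ := ih (C := c :: C') (by simpa using h')
        refine ⟨j + 1, by simpa using hj, by simpa using hy, ?_⟩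
        rw [List.take_succ_cons]
        exact hc.cons _
      | cons₂ _ h' =>
        obtain ⟨j, hj, hy, hc⟩ := ih (C := C') h'
        refine ⟨j + 1, by simpa using hj, by simpa using hy, ?_⟩
        rw [List.take_succ_cons]
        exact hc.cons₂ _

-- properties of B's inner fold: a running max of dp values at compatible predecessors
theorem inner_fold_props (Z : List ((Int × Int) × Int)) (x : Int × Int) :
    ∀ b : Int,
      b ≤ Z.foldl (fun best q => if q.1.2 < x.1 ∧ q.2 > best then q.2 else best) b ∧
      (∀ q ∈ Z, q.1.2 < x.1 → q.2 ≤ Z.foldl (fun best q => if q.1.2 < x.1 ∧ q.2 > best then q.2 else best) b) ∧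
      (Z.foldl (fun best q => if q.1.2 < x.1 ∧ q.2 > best then q.2 else best) b = b ∨
        ∃ q ∈ Z, q.1.2 < x.1 ∧ Z.foldl (fun best q => if q.1.2 < x.1 ∧ q.2 > best then q.2 else best) b = q.2) := by
  induction Z with
  | nil => intro b; simp
  | cons z Z ih =>
    intro b
    simp only [List.foldl_cons]
    by_cases hz : z.1.2 < x.1 ∧ z.2 > b
    · rw [if_pos hz]
      obtain ⟨h1, h2, h3⟩ := ih z.2
      refine ⟨by omega, ?_, ?_⟩
      · intro q hq hqx
        rcases List.mem_cons.mp hq with rfl | hq'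
        · omega
        · exact h2 q hq' hqx
      · rcases h3 with h | ⟨q, hq, hqx, he⟩
        · exact Or.inr ⟨z, by simp, hz.1, h⟩
        · exact Or.inr ⟨q, by simp [hq], hqx, he⟩
    · rw [if_neg hz]
      obtain ⟨h1, h2, h3⟩ := ih b
      refine ⟨h1, ?_, ?_⟩
      · intro q hq hqx
        rcases List.mem_cons.mp hq with rfl | hq'
        · push Not at hz
          have := hz hqx
          omega
        · exact h2 q hq' hqx
      · rcases h3 with h | ⟨q, hq, hqx, he⟩
        · exact Or.inl h
        · exact Or.inr ⟨q, by simp [hq], hqx, he⟩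

theorem zip_append_of_length_le {α β : Type} (P Q : List α) (D : List β)
    (h : D.length ≤ P.length) : (P ++ Q).zip D = P.zip D := by
  induction P generalizing D with
  | nil =>
    cases D with
    | nil => simp
    | cons d D' => simp at h
  | cons p P' ih =>
    cases D with
    | nil => simp
    | cons d D' =>
      simp only [List.cons_append, List.zip_cons_cons, List.cons.injEq]
      exact ⟨trivial, ih D' (by simpa using h)⟩

theorem mem_zip_iff_getElem {α β : Type} {P : List α} {D : List β} {q : α × β}
    (hlen : D.length = P.length) :
    q ∈ P.zip D ↔ ∃ j, ∃ hj : j < P.length, ∃ hj' : j < D.length, (P[j], D[j]) = q := by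
  rw [List.mem_iff_getElem]
  constructor
  · rintro ⟨j, hj, hq⟩
    have hjl : j < P.length := by simp [List.length_zip] at hj; omega
    refine ⟨j, hjl, by omega, ?_⟩
    rw [← hq, List.getElem_zip]
  · rintro ⟨j, hj, hj', hq⟩
    refine ⟨j, by simp [List.length_zip]; omega, ?_⟩
    rw [List.getElem_zip]
    exact hq

-- one step of B's dp loop, and the dp invariant: each entry is exactly the length of the
-- longest RP-chain through earlier pairs ending at its own pair
def dpStep (iv : List (Int × Int)) (dp : List Int) (p : Int × Int) : List Int :=
  dp ++ [(iv.zip dp).foldl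
    (fun best q => if q.1.2 < p.1 ∧ q.2 > best then q.2 else best) 0 + 1]

def dpInv (P : List (Int × Int)) (D : List Int) : Prop :=
  D.length = P.length ∧
  ∀ j (hj : j < P.length) (hD : j < D.length),
    (∃ C, C.Sublist (P.take j) ∧ List.IsChain RP (C ++ [P[j]]) ∧ (C.length : Int) + 1 = D[j]) ∧
    (∀ C, C.Sublist (P.take j) → List.IsChain RP (C ++ [P[j]]) → (C.length : Int) + 1 ≤ D[j])

theorem dp_invariant (iv : List (Int × Int)) :
    ∀ (Q P : List (Int × Int)) (D : List Int), iv = P ++ Q → dpInv P D →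
      dpInv iv (Q.foldl (dpStep iv) D) := by
  intro Q
  induction Q with
  | nil =>
    intro P D hiv hinv
    simpa [List.foldl_nil, hiv] using hinv
  | cons x Q' ih =>
    intro P D hiv hinv
    obtain ⟨hlen, hspec⟩ := hinv
    simp only [List.foldl_cons]
    set e := (iv.zip D).foldl (fun best q => if q.1.2 < x.1 ∧ q.2 > best then q.2 else best) 0 + 1 with he
    have hzip : iv.zip D = P.zip D := by
      rw [hiv]
      exact zip_append_of_length_le P (x :: Q') D (by omega)
    have hstep : dpStep iv D x = D ++ [e] := by rw [dpStep]
    rw [hstep]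
    apply ih (P ++ [x]) (D ++ [e]) (by rw [hiv]; simp)
    constructor
    · simp [hlen]
    · intro j hj hD
      simp only [List.length_append, List.length_cons] at hj
      by_cases hjP : j < P.length
      · have ht : (P ++ [x]).take j = P.take j := List.take_append_of_le_length (by omega)
        have hg : (P ++ [x])[j]'(by simp; omega) = P[j]'hjP := by
          rw [List.getElem_append_left hjP]
        have hg2 : (D ++ [e])[j]'hD = D[j]'(by omega) := by
          rw [List.getElem_append_left (by omega)]
        rw [ht, hg, hg2]
        exact hspec j hjP (by omega)
      · have hjeq : j = P.length := by simp at hj hD; omega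
        subst hjeq
        have ht : (P ++ [x]).take P.length = P := by
          rw [List.take_append_of_le_length (le_refl _), List.take_length]
        have hg : (P ++ [x])[P.length]'(by simp) = x := by simp
        have hg2 : (D ++ [e])[P.length]'hD = e := by
          rw [List.getElem_append_right (by omega)]
          have h0 : P.length - D.length = 0 := by omega
          simp [h0]
        rw [ht, hg, hg2]
        obtain ⟨hge, hmax, hach⟩ := inner_fold_props (P.zip D) x 0
        rw [← hzip] at hge hmax hach
        constructor
        · rcases hach with h0 | ⟨q, hq, hqx, hqe⟩
          · exact ⟨[], by simp, by simp [RP], by rw [he, h0]; simp⟩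
          · rw [hzip] at hq
            obtain ⟨j', hj', hj'', hq'⟩ := (mem_zip_iff_getElem (by omega)).mp hq
            obtain ⟨C', hC1, hC2, hC3⟩ := (hspec j' hj' hj'').1
            refine ⟨C' ++ [P[j']], ?_, ?_, ?_⟩
            · have hsub : (C' ++ [P[j']]).Sublist (P.take (j' + 1)) := by
                rw [List.take_succ, List.getElem?_eq_getElem hj']
                exact hC1.append (by simp)
              exact hsub.trans (List.take_sublist _ _)
            · rw [List.isChain_append]
              refine ⟨hC2, by simp, ?_⟩
              intro u hu v hv
              rw [List.getLast?_concat] at hu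
              simp only [List.head?_cons, Option.mem_some_iff] at hu hv
              subst hu; subst hv
              show RP P[j'] x
              have hq1 : q.1 = P[j'] := by rw [← hq']
              rw [RP, ← hq1]
              exact hqx
            · simp only [List.length_append, List.length_cons, List.length_nil]
              rw [he, hqe]
              have : q.2 = D[j'] := by rw [← hq']
              push_cast
              omega
        · intro C hCsub hCchain
          rcases List.eq_nil_or_concat C with rfl | ⟨C', y, rfl⟩
          · have h1 : (0:Int) ≤ e - 1 := by rw [he]; simpa using hge
            simp only [List.nil_append, List.length_nil, Nat.cast_zero, zero_add]
            omega
          · rw [List.concat_eq_append] at hCsub hCchain ⊢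
            obtain ⟨j', hj', hyeq, hC'⟩ := sublist_concat_decomp hCsub
            rw [List.isChain_append] at hCchain
            obtain ⟨hchain1, _, hrel⟩ := hCchain
            have hyx : RP y x := by
              apply hrel
              · rw [List.getLast?_concat]; rfl
              · simp
            have hbound := (hspec j' hj' (by omega)).2 C' hC' (by rw [hyeq]; exact hchain1)
            have hqmem : (P[j'], D[j']'(by omega)) ∈ P.zip D :=
              (mem_zip_iff_getElem (by omega)).mpr ⟨j', hj', by omega, rfl⟩
            have hle := hmax (P[j'], D[j']'(by omega)) (by rw [hzip]; exact hqmem)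
              (by simpa [hyeq] using hyx)
            simp only [List.length_append, List.length_cons, List.length_nil]
            rw [he]
            push_cast
            omega

-- ===== extracting the longest-chain value from the finished dp =====
theorem maxD_facts (dp : List Int) :
    (dp = [] ∧ PySem.List.maxD dp (fun x => x) 0 = 0) ∨
    (PySem.List.maxD dp (fun x => x) 0 ∈ dp ∧
      ∀ y ∈ dp, y ≤ PySem.List.maxD dp (fun x => x) 0) := by
  have hdef : PySem.List.maxD dp (fun x => x) 0 = (PySem.List.max? dp (fun x => x)).getD 0 := rfl
  cases hm : PySem.List.max? dp (fun x => x) with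
  | none =>
    left
    exact ⟨(PySem.List.max?_eq_none_iff _ _).mp hm, by rw [hdef, hm]; rfl⟩
  | some m =>
    right
    rw [hdef, hm]
    exact ⟨PySem.List.max?_mem hm, fun y hy => PySem.List.max?_isMax hm y hy⟩

theorem dp_max_bound {iv : List (Int × Int)} {dp : List Int} (hinv : dpInv iv dp) :
    ∀ C, C.Sublist iv → List.IsChain RP C →
      (C.length : Int) ≤ PySem.List.maxD dp (fun x => x) 0 := by
  obtain ⟨hlen, hspec⟩ := hinv
  intro C hsub hchain
  rcases maxD_facts dp with ⟨hnil, hzero⟩ | ⟨hmem, hmax⟩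
  · -- dp empty → iv empty → C empty
    have : iv = [] := by rw [hnil] at hlen; exact List.length_eq_zero_iff.mp hlen.symm
    subst this
    have : C = [] := List.sublist_nil.mp hsub
    simp [this, hzero]
  · rcases List.eq_nil_or_concat C with rfl | ⟨C', y, rfl⟩
    · -- 0 ≤ max: max is some dp entry, every entry = chainlen + 1 ≥ 1
      obtain ⟨j, hj, hje⟩ := List.mem_iff_getElem.mp hmem
      obtain ⟨C0, _, _, hC3⟩ := (hspec j (by omega) hj).1
      simp only [List.length_nil, Nat.cast_zero]
      omega
    · rw [List.concat_eq_append] at hsub hchain ⊢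
      obtain ⟨j, hj, hyeq, hC'⟩ := sublist_concat_decomp hsub
      have hb := (hspec j hj (by omega)).2 C' hC' (by rw [hyeq]; exact hchain)
      have hmem' : dp[j]'(by omega) ∈ dp := List.getElem_mem (by omega)
      have := hmax _ hmem'
      simp only [List.length_append, List.length_cons, List.length_nil]
      push_cast
      omega

theorem dp_max_ach {iv : List (Int × Int)} {dp : List Int} (hinv : dpInv iv dp) :
    ∃ C, C.Sublist iv ∧ List.IsChain RP C ∧
      (C.length : Int) = PySem.List.maxD dp (fun x => x) 0 := by
  obtain ⟨hlen, hspec⟩ := hinv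
  rcases maxD_facts dp with ⟨hnil, hzero⟩ | ⟨hmem, hmax⟩
  · exact ⟨[], List.nil_sublist _, by simp, by simp [hzero]⟩
  · obtain ⟨j, hj, hje⟩ := List.mem_iff_getElem.mp hmem
    obtain ⟨C0, hC1, hC2, hC3⟩ := (hspec j (by omega) hj).1
    refine ⟨C0 ++ [iv[j]'(by omega)], ?_, hC2, ?_⟩
    · have hsub : (C0 ++ [iv[j]'(by omega)]).Sublist (iv.take (j + 1)) := by
        rw [List.take_succ, List.getElem?_eq_getElem (by omega)]
        exact hC1.append (by simp)
      exact hsub.trans (List.take_sublist _ _)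
    · simp only [List.length_append, List.length_cons, List.length_nil]
      rw [← hje]
      push_cast
      omega

-- ===== A's search characterised =====
-- 'some size-k combination of deletable values leaves a sorted remainder'
def Sc (arr vals : List Int) (k : Nat) : Prop :=
  ∃ D : List Int, D.Sublist vals ∧ D.length = k ∧
    List.Pairwise (· ≤ ·) (arr.filter (fun x => !(D.contains x)))

theorem any_iff_Sc (arr vals : List Int) (k : Nat) :
    ((PySem.List.combinations vals k).any
      (fun delete_values => is_monotonic_increasing
        (arr.filter (fun x => !(delete_values.contains x)))) = true) ↔ Sc arr vals k := by
  rw [List.any_eq_true]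
  constructor
  · rintro ⟨D, hD, hmono⟩
    obtain ⟨hsub, hlen⟩ := (PySem.List.mem_combinations_iff _ _ _).mp hD
    exact ⟨D, hsub, hlen, (isMono_iff _).mp hmono⟩
  · rintro ⟨D, hsub, hlen, hmono⟩
    exact ⟨D, (PySem.List.mem_combinations_iff _ _ _).mpr ⟨hsub, hlen⟩, (isMono_iff _).mpr hmono⟩

theorem Sc_iff_chain {arr vals : List Int}
    (hvm : ∀ v ∈ vals, v ∈ arr) (hva : ∀ v ∈ arr, v ∈ vals)
    (hlt : vals.Pairwise (· < ·)) (hnd : vals.Nodup) (k : Nat) :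
    Sc arr vals k ↔
      ∃ K : List Int, K.Sublist vals ∧ List.IsChain (fun v w => lN arr v < fN arr w) K ∧
        K.length = vals.length - k ∧ k ≤ vals.length := by
  constructor
  · rintro ⟨D, hsub, hlen, hmono⟩
    set K := vals.filter (fun x => !decide (x ∈ D)) with hK
    have hKsub : K.Sublist vals := List.filter_sublist
    have hKmem : ∀ x ∈ K, x ∈ arr := fun x hx => hvm x (hKsub.subset hx)
    have hKlt : K.Pairwise (· < ·) := hlt.sublist hKsub
    have hgood := (mono_filter_iff arr (fun x => !(D.contains x))).mp hmono
    refine ⟨K, hKsub, ?_, ?_, ?_⟩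
    · rw [chain_iff_pairwise_RR hKmem, pairwise_RR_iff_good hKmem hKlt]
      intro v w hv hw hvK hwK hvw
      have hpv : (!(D.contains v)) = true := by
        rw [hK, List.mem_filter] at hvK
        simpa using hvK.2
      have hpw : (!(D.contains w)) = true := by
        rw [hK, List.mem_filter] at hwK
        simpa using hwK.2
      exact hgood v w hv hw hpv hpw hvw
    · rw [hK, length_filter_not_mem hnd hsub, hlen]
    · rw [← hlen]; exact hsub.length_le
  · rintro ⟨K, hKsub, hchain, hKlen, hk⟩
    set D := vals.filter (fun x => !decide (x ∈ K)) with hD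
    have hDsub : D.Sublist vals := List.filter_sublist
    have hKmem : ∀ x ∈ K, x ∈ arr := fun x hx => hvm x (hKsub.subset hx)
    have hKlt : K.Pairwise (· < ·) := hlt.sublist hKsub
    have hgood := (pairwise_RR_iff_good hKmem hKlt).mp
      ((chain_iff_pairwise_RR hKmem).mp hchain)
    refine ⟨D, hDsub, ?_, ?_⟩
    · rw [hD, length_filter_not_mem hnd hKsub]
      have := hKsub.length_le
      omega
    · rw [mono_filter_iff]
      intro v w hv hw hpv hpw hvw
      have hmemK : ∀ x, x ∈ arr → (!(D.contains x)) = true → x ∈ K := by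
        intro x hx hpx
        have hxv : x ∈ vals := hva x hx
        simp only [hD, Bool.not_eq_true', List.contains_eq_mem, decide_eq_false_iff_not,
          List.mem_filter] at hpx
        by_contra hxK
        exact hpx ⟨hxv, by simpa using hxK⟩
      exact hgood v w hv hw (hmemK v hv hpv) (hmemK w hw hpw) hvw

-- A's delete_count loop, run from position a with min_deletions still at its initial value
theorem loop_run (arr vals : List Int) (LN : Nat) :
    ∀ (cnt a : Nat),
      a + cnt = vals.length →
      (∀ j, j < a → ¬ Sc arr vals j) →
      a ≤ vals.length - LN →
      Sc arr vals (vals.length - LN) →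
      (∀ k, Sc arr vals k → vals.length - LN ≤ k) →
      1 ≤ LN → LN ≤ vals.length →
      min_delete_loop arr vals (List.range' a cnt) (vals.length : Int)
        = ((vals.length - LN : Nat) : Int) := by
  intro cnt
  induction cnt with
  | zero =>
    intro a hsum hprev ha hex hmin h1 h2
    exfalso
    have := hprev (vals.length - LN) (by omega)
    exact this hex
  | succ cnt ih =>
    intro a hsum hprev ha hex hmin h1 h2
    rw [List.range'_succ]
    rw [min_delete_loop]
    by_cases hs : Sc arr vals a
    · have hcond := (any_iff_Sc arr vals a).mpr hs
      rw [hcond]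
      simp only [if_true]
      have halt : a = vals.length - LN := by
        have := hmin a hs
        omega
      have hlt : (a : Int) < (vals.length : Int) := by
        have : a < vals.length := by omega
        exact_mod_cast this
      have hminv : min (vals.length : Int) (a : Int) = (a : Int) := by omega
      rw [hminv, if_pos (le_refl _)]
      rw [halt]
    · have hcond : ((PySem.List.combinations vals a).any
          (fun delete_values => is_monotonic_increasing
            (arr.filter (fun x => !(delete_values.contains x))))) = false := by
        rw [← Bool.not_eq_true, any_iff_Sc]
        exact hs
      rw [hcond]
      simp only [Bool.false_eq_true, if_false]
      have hnotle : ¬ ((vals.length : Int) ≤ (a : Int)) := by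
        have : a < vals.length := by omega
        push Not
        exact_mod_cast this
      rw [if_neg hnotle]
      apply ih (a + 1) (by omega)
      · intro j hj
        rcases Nat.lt_succ_iff_lt_or_eq.mp hj with hj' | rfl
        · exact hprev j hj'
        · exact hs
      · have : a ≠ vals.length - LN := fun he => hs (he ▸ hex)
        omega
      · exact hex
      · exact hmin
      · exact h1
      · exact h2

-- dpInv holds for the empty prefix
theorem dpInv_nil : dpInv [] [] :=
  ⟨rfl, fun j hj _ => absurd hj (by simp)⟩

-- mapping values to their pairs preserves chains
theorem chain_map_iff (arr : List Int) (K : List Int) :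
    List.IsChain RP (K.map (fun v => ((fN arr v : Int), (lN arr v : Int)))) ↔
      List.IsChain (fun v w => lN arr v < fN arr w) K := by
  rw [List.isChain_map]
  constructor
  · intro h
    exact h.imp (fun {a b} hr => by simpa [RP] using hr)
  · intro h
    exact h.imp (fun {a b} hr => by simpa [RP] using hr)

-- ===== VERDICT (by name: the statement is the Claim_ definition above) =====
theorem min_delete_operations_spec : Claim_equal_min_delete_operations := by
  intro n arr _
  unfold Spec_min_delete_operations min_delete_operations min_delete_operations_alt
  by_cases hn : (n == 0) = true
  · rw [if_pos hn, if_pos hn]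
  · rw [if_neg hn, if_neg hn]
    simp only [PySem.List.slice?_none_none_neg_one, Option.getD_some]
    set vals := PySem.List.sorted (PySem.Set.ofList arr) (fun x => x) with hvals
    set iv := vals.map (fun v =>
      ((((PySem.List.index? arr v).getD 0 : Nat) : Int),
       ((arr.length : Nat) : Int) - 1 - (((PySem.List.index? arr.reverse v).getD 0 : Nat) : Int))) with hivdef
    have hvm : ∀ v ∈ vals, v ∈ arr := by
      intro v hv
      rw [hvals, PySem.List.mem_sorted] at hv
      exact (PySem.Set.mem_ofList arr v).mp hv
    have hva : ∀ v ∈ arr, v ∈ vals := by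
      intro v hv
      rw [hvals, PySem.List.mem_sorted]
      exact (PySem.Set.mem_ofList arr v).mpr hv
    have hlt : vals.Pairwise (· < ·) := PySem.List.sorted_ofList_pairwise_lt arr
    have hnd : vals.Nodup := hlt.imp (fun h => ne_of_lt h)
    have hiv : iv = vals.map (fun v => ((fN arr v : Int), (lN arr v : Int))) := by
      rw [hivdef]
      apply List.map_congr_left
      intro v hv
      exact pvB_eq (hvm v hv)
    have hivlen : iv.length = vals.length := by rw [hiv, List.length_map]
    have hinv : dpInv iv (iv.foldl (dpStep iv) []) :=
      dp_invariant iv iv [] [] (by simp) dpInv_nil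
    set dp := iv.foldl (dpStep iv) [] with hdp
    set L := PySem.List.maxD dp (fun x => x) 0 with hL
    have hfold : (iv.foldl (fun (dp : List Int) p =>
        dp ++ [(iv.zip dp).foldl
          (fun best q => if q.1.2 < p.1 ∧ q.2 > best then q.2 else best) 0 + 1]) []) = dp := rfl
    have hLle : L ≤ (iv.length : Int) := by
      obtain ⟨C, hCsub, _, hClen⟩ := dp_max_ach hinv
      rw [hL, ← hClen]
      exact_mod_cast hCsub.length_le
    by_cases hm : is_monotonic_increasing arr = true
    · rw [if_pos hm]
      have hgood := (mono_filter_iff arr (fun _ => true)).mp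
        (by rw [List.filter_true]; exact (isMono_iff arr).mp hm)
      have hpRR : List.Pairwise (fun v w => lN arr v < fN arr w) vals :=
        (pairwise_RR_iff_good hvm hlt).mpr
          (fun v w hv hw _ _ hvw => hgood v w hv hw rfl rfl hvw)
      have hchain_iv : List.IsChain RP iv := by
        rw [hiv, chain_map_iff]
        exact hpRR.isChain
      have hge : (iv.length : Int) ≤ L := by
        have := dp_max_bound hinv iv (List.Sublist.refl iv) hchain_iv
        rw [hL]
        exact this
      rw [hfold]
      rw [← hivlen]
      omega
    · rw [if_neg hm]
      have harrne : arr ≠ [] := by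
        intro h
        rw [h] at hm
        exact hm rfl
      have hvalsne : vals ≠ [] := by
        obtain ⟨a, ha⟩ := List.exists_mem_of_ne_nil arr harrne
        exact List.ne_nil_of_mem (hva a ha)
      have hupos : 0 < vals.length := List.length_pos_of_ne_nil hvalsne
      have hdplen : dp.length = iv.length := hinv.1
      have hLpos : 1 ≤ L := by
        rcases maxD_facts dp with ⟨hnil, _⟩ | ⟨hmem, hmax⟩
        · exfalso
          rw [hnil] at hdplen
          simp [hivlen] at hdplen
          omega
        · have h0 : 0 < dp.length := by rw [hdplen, hivlen]; omega
          obtain ⟨C0, _, _, hC3⟩ := (hinv.2 0 (by omega) h0).1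
          have := hmax _ (List.getElem_mem h0)
          rw [hL]
          omega
      have hL0 : 0 ≤ L := by omega
      set LN := L.toNat with hLNdef
      have hLN : (LN : Int) = L := Int.toNat_of_nonneg hL0
      have hLNle : LN ≤ vals.length := by
        rw [hivlen] at hLle
        omega
      have hLN1 : 1 ≤ LN := by omega
      have hSc_ex : Sc arr vals (vals.length - LN) := by
        obtain ⟨C, hCsub, hCchain, hClen⟩ := dp_max_ach hinv
        rw [hiv] at hCsub
        obtain ⟨K, hKsub, rfl⟩ := List.sublist_map_iff.mp hCsub
        have hKchain := (chain_map_iff arr K).mp hCchain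
        have hKlen : K.length = LN := by
          rw [List.length_map] at hClen
          omega
        refine (Sc_iff_chain hvm hva hlt hnd (vals.length - LN)).mpr
          ⟨K, hKsub, hKchain, by omega, by omega⟩
      have hSc_min : ∀ k, Sc arr vals k → vals.length - LN ≤ k := by
        intro k hk
        obtain ⟨K, hKsub, hKchain, hKlen, hkle⟩ :=
          (Sc_iff_chain hvm hva hlt hnd k).mp hk
        have hCsub : (K.map (fun v => ((fN arr v : Int), (lN arr v : Int)))).Sublist iv := by
          rw [hiv]
          exact hKsub.map _
        have hbound := dp_max_bound hinv _ hCsub ((chain_map_iff arr K).mpr hKchain)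
        rw [List.length_map, hKlen] at hbound
        rw [hL] at hLN
        omega
      rw [List.range_eq_range']
      rw [loop_run arr vals LN vals.length 0 (by omega) (by intro j hj; omega)
        (by omega) hSc_ex hSc_min hLN1 hLNle]
      rw [hfold]
      push_cast [hLN]
      omega
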